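-- pv_equiv track=rewrite | github.com/deltatech666-lgtm/land-risk-app | app.py | _score_comment
-- ===== SOURCE A (Python) =====
-- def _score_comment(category: str, score: int) -> str:
--     comments = {
--         'terrain': {
--             (18, 20): '平坦で造成難易度は低い',
--             (12, 17): '中程度の造成工事が必要',
--             ( 6, 11): '大規模造成工事が見込まれる',
--             ( 0,  5): '急峻地形、造成難易度が非常に高い',
--         },
--         'soil': {
--             (18, 20): '良好地盤、標準基礎で対応可',
--             (12, 17): 'やや軟弱、地盤調査を推奨',
--             ( 6, 11): '軟弱地盤、地盤改良工事が必要',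
--             ( 0,  5): '非常に軟弱、専門的調査が必須',
--         },
--         'disaster': {
--             (18, 20): '災害リスクは低い',
--             (12, 17): '軽微なリスク、対策で対応可',
--             ( 6, 11): '複数リスクあり、慎重な設計が必要',
--             ( 0,  5): '高リスク、総合的対策が必須',
--         },
--         'regulation': {
--             (18, 20): '規制は標準的',
--             (12, 17): '一般的な法規制に注意',
--             ( 6, 11): '複数法規制の確認が必要',
--             ( 0,  5): '複雑な法規制、専門家相談必須',
--         },
--         'cost': {
--             (18, 20): '低コスト、経済的に有利',
--             (12, 17): '標準的なコスト水準',
--             ( 6, 11): '高コスト、資金計画に注意',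
--             ( 0,  5): '非常に高コスト、事業性の再検討を推奨',
--         },
--     }
--     for (lo, hi), text in comments.get(category, {}).items():
--         if lo <= score <= hi:
--             return text
--     return ''
-- ===== SOURCE B (Python) =====
-- def _score_comment(category: str, score: int) -> str:
--     comments = {
--         'terrain': ['平坦で造成難易度は低い', '中程度の造成工事が必要',
--                     '大規模造成工事が見込まれる', '急峻地形、造成難易度が非常に高い'],
--         'soil': ['良好地盤、標準基礎で対応可', 'やや軟弱、地盤調査を推奨',
--                  '軟弱地盤、地盤改良工事が必要', '非常に軟弱、専門的調査が必須'],
--         'disaster': ['災害リスクは低い', '軽微なリスク、対策で対応可',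
--                      '複数リスクあり、慎重な設計が必要', '高リスク、総合的対策が必須'],
--         'regulation': ['規制は標準的', '一般的な法規制に注意',
--                        '複数法規制の確認が必要', '複雑な法規制、専門家相談必須'],
--         'cost': ['低コスト、経済的に有利', '標準的なコスト水準',
--                  '高コスト、資金計画に注意', '非常に高コスト、事業性の再検討を推奨'],
--     }
--     texts = comments.get(category)
--     if texts is None or score < 0 or score > 20:
--         return ''
--     if score >= 18:
--         idx = 0
--     elif score >= 12:
--         idx = 1
--     elif score >= 6:
--         idx = 2
--     else:
--         idx = 3
--     return texts[idx]
-- ===== Notes on version B (the rewrite author's own statement) =====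
-- stated objective: simpler
-- what changed: Replaces A's iteration over (lo,hi)-range-keyed nested dicts with per-category lists of the four comments and a direct threshold ladder (>=18/>=12/>=6) computing the band index, returning '' for unknown categories or scores outside 0-20.
import Mathlib
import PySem

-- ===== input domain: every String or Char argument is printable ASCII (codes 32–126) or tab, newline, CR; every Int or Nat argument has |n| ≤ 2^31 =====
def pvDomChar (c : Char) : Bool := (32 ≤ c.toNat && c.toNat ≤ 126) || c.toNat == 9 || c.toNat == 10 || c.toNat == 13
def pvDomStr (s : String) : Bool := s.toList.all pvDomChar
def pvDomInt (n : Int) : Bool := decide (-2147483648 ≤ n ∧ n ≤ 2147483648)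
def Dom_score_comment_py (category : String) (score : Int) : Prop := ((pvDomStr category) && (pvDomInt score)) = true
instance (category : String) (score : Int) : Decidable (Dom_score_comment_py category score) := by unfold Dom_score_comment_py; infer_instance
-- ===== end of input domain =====

-- B replaces A's loop over (lo,hi)-keyed range dicts with per-category lists of
-- the four comments and a direct threshold ladder computing the band index (simpler).

-- ===== PORT A =====
-- the nested dict literal of A: category ↦ dict from (lo,hi) ranges to comment text
def pvAComments : PySem.Dict String (PySem.Dict (Int × Int) String) :=
  PySem.Dict.ofList
    [ ("terrain", PySem.Dict.ofList
        [ ((18, 20), "平坦で造成難易度は低い")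
        , ((12, 17), "中程度の造成工事が必要")
        , ((6, 11), "大規模造成工事が見込まれる")
        , ((0, 5), "急峻地形、造成難易度が非常に高い") ])
    , ("soil", PySem.Dict.ofList
        [ ((18, 20), "良好地盤、標準基礎で対応可")
        , ((12, 17), "やや軟弱、地盤調査を推奨")
        , ((6, 11), "軟弱地盤、地盤改良工事が必要")
        , ((0, 5), "非常に軟弱、専門的調査が必須") ])
    , ("disaster", PySem.Dict.ofList
        [ ((18, 20), "災害リスクは低い")
        , ((12, 17), "軽微なリスク、対策で対応可")
        , ((6, 11), "複数リスクあり、慎重な設計が必要")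
        , ((0, 5), "高リスク、総合的対策が必須") ])
    , ("regulation", PySem.Dict.ofList
        [ ((18, 20), "規制は標準的")
        , ((12, 17), "一般的な法規制に注意")
        , ((6, 11), "複数法規制の確認が必要")
        , ((0, 5), "複雑な法規制、専門家相談必須") ])
    , ("cost", PySem.Dict.ofList
        [ ((18, 20), "低コスト、経済的に有利")
        , ((12, 17), "標準的なコスト水準")
        , ((6, 11), "高コスト、資金計画に注意")
        , ((0, 5), "非常に高コスト、事業性の再検討を推奨") ]) ]

-- the for-loop with early return: first matching range wins, else ''
def pvALoop (score : Int) : List ((Int × Int) × String) → String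
  | [] => ""
  | ((lo, hi), text) :: rest =>
      if lo ≤ score ∧ score ≤ hi then text else pvALoop score rest

def score_comment_py (category : String) (score : Int) : String :=
  pvALoop score ((pvAComments.getD category PySem.Dict.empty).items)

-- ===== PORT B =====
-- B's dict: category ↦ list of the four comments, band 0 (highest) … band 3 (lowest)
def pvBComments : PySem.Dict String (List String) :=
  PySem.Dict.ofList
    [ ("terrain", ["平坦で造成難易度は低い", "中程度の造成工事が必要",
                   "大規模造成工事が見込まれる", "急峻地形、造成難易度が非常に高い"])
    , ("soil", ["良好地盤、標準基礎で対応可", "やや軟弱、地盤調査を推奨",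
                "軟弱地盤、地盤改良工事が必要", "非常に軟弱、専門的調査が必須"])
    , ("disaster", ["災害リスクは低い", "軽微なリスク、対策で対応可",
                    "複数リスクあり、慎重な設計が必要", "高リスク、総合的対策が必須"])
    , ("regulation", ["規制は標準的", "一般的な法規制に注意",
                      "複数法規制の確認が必要", "複雑な法規制、専門家相談必須"])
    , ("cost", ["低コスト、経済的に有利", "標準的なコスト水準",
                "高コスト、資金計画に注意", "非常に高コスト、事業性の再検討を推奨"]) ]

def score_comment_py_alt (category : String) (score : Int) : String :=
  match pvBComments.get? category with
  | none => ""
  | some texts =>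
      if score < 0 ∨ score > 20 then ""
      else
        -- texts[idx]: the band index is in {0,1,2,3} and every list has 4 elements, so never an IndexError
        (PySem.List.pyGet? texts
          (if score ≥ 18 then 0 else if score ≥ 12 then 1
           else if score ≥ 6 then 2 else 3)).getD ""

-- ===== PRECONDITION & SPEC =====
def Spec_score_comment_py (category : String) (score : Int) (out : String) : Prop := out = score_comment_py_alt category score
instance (category : String) (score : Int) (out : String) : Decidable (Spec_score_comment_py category score out) := by unfold Spec_score_comment_py; infer_instance

-- ===== CLAIM (what is proved, stated in full; the proofs are below) =====
def Claim_equal_score_comment_py : Prop := ∀ (category : String) (score : Int), Dom_score_comment_py category score → Spec_score_comment_py category score (score_comment_py category score)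

-- ===== LEMMAS AND PROOFS =====
-- Generic band agreement: A's first-match scan over the four ranges equals B's
-- threshold-ladder index into the four comments, for any four comment strings.
set_option maxHeartbeats 1000000 in
theorem pv_band_eq (x y : String) (s : Int) (c0 c1 c2 c3 : String)
    (hA : x = pvALoop s [((18, 20), c0), ((12, 17), c1), ((6, 11), c2), ((0, 5), c3)])
    (hB : y = if s < 0 ∨ s > 20 then ""
          else (PySem.List.pyGet? [c0, c1, c2, c3]
            (if s ≥ 18 then 0 else if s ≥ 12 then 1
             else if s ≥ 6 then 2 else 3)).getD "") : x = y := by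
  subst hA hB
  simp only [pvALoop]
  split_ifs <;> first | omega | rfl

-- Unknown category: both lookups miss and both sides return ''.
theorem pv_none_eq (c : String) (s : Int)
    (h1 : c ≠ "terrain") (h2 : c ≠ "soil") (h3 : c ≠ "disaster")
    (h4 : c ≠ "regulation") (h5 : c ≠ "cost") :
    score_comment_py c s = score_comment_py_alt c s := by
  have hk : pvAComments.keys = ["terrain", "soil", "disaster", "regulation", "cost"] := rfl
  have hk' : pvBComments.keys = ["terrain", "soil", "disaster", "regulation", "cost"] := rfl
  have hB : pvBComments.get? c = none := by
    rw [PySem.Dict.get?_eq_none_iff_not_mem_keys, hk']; simp [h1, h2, h3, h4, h5]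
  have hA : pvAComments.get? c = none := by
    rw [PySem.Dict.get?_eq_none_iff_not_mem_keys, hk]; simp [h1, h2, h3, h4, h5]
  simp only [score_comment_py, score_comment_py_alt, hB,
    PySem.Dict.getD_eq_get?_getD, hA, Option.getD_none]
  rfl

-- ===== VERDICT (by name: the statement is the Claim_ definition above) =====
theorem score_comment_py_spec : Claim_equal_score_comment_py := by
  intro category score _
  unfold Spec_score_comment_py
  by_cases h1 : category = "terrain"
  · subst h1; exact pv_band_eq _ _ score _ _ _ _ rfl rfl
  by_cases h2 : category = "soil"
  · subst h2; exact pv_band_eq _ _ score _ _ _ _ rfl rfl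
  by_cases h3 : category = "disaster"
  · subst h3; exact pv_band_eq _ _ score _ _ _ _ rfl rfl
  by_cases h4 : category = "regulation"
  · subst h4; exact pv_band_eq _ _ score _ _ _ _ rfl rfl
  by_cases h5 : category = "cost"
  · subst h5; exact pv_band_eq _ _ score _ _ _ _ rfl rfl
  exact pv_none_eq category score h1 h2 h3 h4 h5
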